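-- pv_equiv track=rewrite | github.com/UntamedIQ/Proletto | update_scrapers_for_tier_access.py | detect_opportunity_type
-- ===== SOURCE A (Python) =====
-- def detect_opportunity_type(title, description, source, tags=None, category=None):
--     """Determine the opportunity type based on various fields"""
--     # Normalize inputs
--     title = title.lower() if title else ''
--     description = description.lower() if description else ''
--     source = source.lower() if source else ''
--     tags = tags.lower() if tags else ''
--     category = category.lower() if category else ''
--
--     # Check for social media indicators
--     social_media_keywords = ['instagram', 'facebook', 'twitter', 'linkedin', 'social', 'post', 'platform']
--     for keyword in social_media_keywords:
--         if (keyword in source or keyword in category or keyword in tags or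
--             keyword in title or keyword in description):
--             return 'social_media'
--
--     # Check for grant indicators
--     grant_keywords = ['grant', 'funding', 'award', 'prize', 'scholarship', 'fellowship', 'financial']
--     for keyword in grant_keywords:
--         if (keyword in source or keyword in category or keyword in tags or
--             keyword in title or keyword in description):
--             return 'grant'
--
--     # Check for residency indicators
--     residency_keywords = ['residency', 'resident', 'residence', 'studio']
--     for keyword in residency_keywords:
--         if (keyword in source or keyword in category or keyword in tags or
--             keyword in title or keyword in description):
--             return 'residency'
--
--     # Check for exhibition indicators
--     exhibition_keywords = ['exhibition', 'exhibit', 'gallery', 'show', 'showcase', 'museum']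
--     for keyword in exhibition_keywords:
--         if (keyword in source or keyword in category or keyword in tags or
--             keyword in title or keyword in description):
--             return 'exhibition'
--
--     # Check for opportunity indicators
--     opportunity_keywords = ['opportunity', 'call', 'application', 'submit', 'apply']
--     for keyword in opportunity_keywords:
--         if (keyword in source or keyword in category or keyword in tags or
--             keyword in title or keyword in description):
--             return 'opportunity'
--
--     # Default type
--     return 'general'
-- ===== SOURCE B (Python) =====
-- _LABELS = ['social_media', 'grant', 'residency', 'exhibition', 'opportunity', 'general']
--
-- _KEYWORDS = [
--     ('instagram', 0), ('facebook', 0), ('twitter', 0), ('linkedin', 0),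
--     ('social', 0), ('post', 0), ('platform', 0),
--     ('grant', 1), ('funding', 1), ('award', 1), ('prize', 1),
--     ('scholarship', 1), ('fellowship', 1), ('financial', 1),
--     ('residency', 2), ('resident', 2), ('residence', 2), ('studio', 2),
--     ('exhibition', 3), ('exhibit', 3), ('gallery', 3), ('show', 3),
--     ('showcase', 3), ('museum', 3),
--     ('opportunity', 4), ('call', 4), ('application', 4), ('submit', 4),
--     ('apply', 4),
-- ]
--
-- # index the keywords by their first character
-- _BY_FIRST = {}
-- for _kw, _rank in _KEYWORDS:
--     _BY_FIRST.setdefault(_kw[0], []).append((_kw, _rank))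
--
--
-- def detect_opportunity_type(title, description, source, tags=None, category=None):
--     """Determine the opportunity type based on various fields"""
--     # Single left-to-right scan of one normalized text: at each position try
--     # only the keywords whose first character is the character there (via the
--     # _BY_FIRST index) and keep the best (lowest) category rank seen anywhere;
--     # no per-category loops, no substring operator, no early return.  Spaces
--     # separate the fields and no keyword contains a space, so a keyword
--     # cannot match across a field boundary.
--     blob = ' '.join(f.lower() if f else '' for f in (source, category, tags, title, description))
--     best = 5  # rank of 'general'
--     for i, ch in enumerate(blob):
--         for kw, rank in _BY_FIRST.get(ch, ()):
--             if rank < best and blob.startswith(kw, i):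
--                 best = rank
--     return _LABELS[best]
-- ===== Notes on version B (the rewrite author's own statement) =====
-- stated objective: alternative
-- what changed: Replaces A's five unrolled per-category keyword loops with early return over five separate fields by a single left-to-right positional scan of one space-joined normalized text: a precomputed first-character index selects the candidate keywords at each position and a running minimum keeps the best (lowest) category rank, which finally indexes a label table; no substring operator and no early return.
import Mathlib
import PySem

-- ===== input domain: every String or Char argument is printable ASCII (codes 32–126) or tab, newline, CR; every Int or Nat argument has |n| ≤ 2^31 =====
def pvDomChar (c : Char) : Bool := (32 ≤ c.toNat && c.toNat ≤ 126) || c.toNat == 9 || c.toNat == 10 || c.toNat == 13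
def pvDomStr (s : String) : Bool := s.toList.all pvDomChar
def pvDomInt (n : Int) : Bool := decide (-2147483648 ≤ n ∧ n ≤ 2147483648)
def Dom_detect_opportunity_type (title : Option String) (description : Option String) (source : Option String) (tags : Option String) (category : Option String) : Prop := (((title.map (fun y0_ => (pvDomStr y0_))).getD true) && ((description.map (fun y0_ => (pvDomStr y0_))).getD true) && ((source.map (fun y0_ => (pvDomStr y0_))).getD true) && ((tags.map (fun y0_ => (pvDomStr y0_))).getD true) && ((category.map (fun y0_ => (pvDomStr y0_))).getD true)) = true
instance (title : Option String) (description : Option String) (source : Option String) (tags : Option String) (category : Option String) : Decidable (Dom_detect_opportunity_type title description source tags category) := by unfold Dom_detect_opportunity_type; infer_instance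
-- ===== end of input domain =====

-- B replaces A's five unrolled per-category keyword loops over five separate fields by a single
-- left-to-right positional scan of one space-joined text, trying at each position only the
-- keywords indexed under that position's character and keeping the minimum category rank found
-- (objective: alternative algorithm).

-- ===== PORT A =====

-- 'x.lower() if x else ""' (None and "" are both falsy; this is A's normalization, reused verbatim by B)
def pvNorm (x : Option String) : String :=
  match x with
  | none => ""
  | some s => if s.toList ≠ [] then PySem.Str.lower s else ""

-- A's per-category loop with early return: 'for keyword in kws: if keyword in source or … : return label'
def pvHitA (kws : List String) (src cat tg ti de : String) : Bool :=
  kws.any (fun kw =>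
    PySem.Str.isIn kw src || PySem.Str.isIn kw cat || PySem.Str.isIn kw tg ||
    PySem.Str.isIn kw ti || PySem.Str.isIn kw de)

def detect_opportunity_type (title : Option String) (description : Option String) (source : Option String) (tags : Option String) (category : Option String) : String :=
  let ti := pvNorm title
  let de := pvNorm description
  let src := pvNorm source
  let tg := pvNorm tags
  let cat := pvNorm category
  if pvHitA ["instagram", "facebook", "twitter", "linkedin", "social", "post", "platform"] src cat tg ti de then "social_media"
  else if pvHitA ["grant", "funding", "award", "prize", "scholarship", "fellowship", "financial"] src cat tg ti de then "grant"
  else if pvHitA ["residency", "resident", "residence", "studio"] src cat tg ti de then "residency"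
  else if pvHitA ["exhibition", "exhibit", "gallery", "show", "showcase", "museum"] src cat tg ti de then "exhibition"
  else if pvHitA ["opportunity", "call", "application", "submit", "apply"] src cat tg ti de then "opportunity"
  else "general"

-- ===== PORT B =====

-- Source B's _KEYWORDS: (keyword, category rank) pairs
def pvKeywords : List (String × Nat) :=
  [("instagram", 0), ("facebook", 0), ("twitter", 0), ("linkedin", 0),
   ("social", 0), ("post", 0), ("platform", 0),
   ("grant", 1), ("funding", 1), ("award", 1), ("prize", 1),
   ("scholarship", 1), ("fellowship", 1), ("financial", 1),
   ("residency", 2), ("resident", 2), ("residence", 2), ("studio", 2),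
   ("exhibition", 3), ("exhibit", 3), ("gallery", 3), ("show", 3),
   ("showcase", 3), ("museum", 3),
   ("opportunity", 4), ("call", 4), ("application", 4), ("submit", 4),
   ("apply", 4)]

-- Source B's _LABELS
def pvLabels : List String :=
  ["social_media", "grant", "residency", "exhibition", "opportunity", "general"]

-- Source B's module-level '_BY_FIRST' index: for kw, rank in _KEYWORDS:
-- _BY_FIRST.setdefault(kw[0], []).append((kw, rank)).  Python's one-character key kw[0]
-- is ported as the Char kw.toList.headD ' ' (every keyword is nonempty, so exact).
def pvBuckets : PySem.Dict Char (List (String × Nat)) :=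
  pvKeywords.foldl (fun d p => d.modify (p.1.toList.headD ' ') [] (· ++ [p])) PySem.Dict.empty

-- Source B's inner loop: 'for kw, rank in _BY_FIRST.get(ch, ()): if rank < best and
-- blob.startswith(kw, i): best = rank'.  'blob.startswith(kw, i)' is exactly
-- 'kw.toList <+: blob.toList.drop i' for 0 ≤ i ≤ len(blob) (ported by hand, exact there).
def pvInner (chars : List Char) (i : Nat) (ch : Char) (best : Nat) : Nat :=
  (PySem.Dict.getD pvBuckets ch []).foldl
    (fun b p => if p.2 < b ∧ p.1.toList.isPrefixOf (chars.drop i) = true then p.2 else b)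
    best

-- Source B's outer loop 'for i, ch in enumerate(blob)'; the index from enumerate is ≥ 0, so
-- .toNat is exact
def pvScan (chars : List Char) : Nat :=
  (PySem.List.enumerate chars).foldl (fun best p => pvInner chars p.1.toNat p.2 best) 5

def detect_opportunity_type_alt (title : Option String) (description : Option String) (source : Option String) (tags : Option String) (category : Option String) : String :=
  let blob := PySem.Str.join " " ([source, category, tags, title, description].map pvNorm)
  -- '_LABELS[best]': best ≤ 5 always (the scan only ever lowers it from 5), so the index never
  -- raises; getD's default is unreachable
  pvLabels.getD (pvScan blob.toList) "general"

-- ===== PRECONDITION & SPEC =====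
def Spec_detect_opportunity_type (title : Option String) (description : Option String) (source : Option String) (tags : Option String) (category : Option String) (out : String) : Prop := out = detect_opportunity_type_alt title description source tags category
instance (title : Option String) (description : Option String) (source : Option String) (tags : Option String) (category : Option String) (out : String) : Decidable (Spec_detect_opportunity_type title description source tags category out) := by unfold Spec_detect_opportunity_type; infer_instance

-- ===== CLAIM (what is proved, stated in full; the proofs are below) =====
def Claim_equal_detect_opportunity_type : Prop := ∀ (title : Option String) (description : Option String) (source : Option String) (tags : Option String) (category : Option String), Dom_detect_opportunity_type title description source tags category → Spec_detect_opportunity_type title description source tags category (detect_opportunity_type title description source tags category)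

-- ===== LEMMAS AND PROOFS =====

-- a keyword not containing c stays on one side of the separator: prefix version
theorem pv_prefix_append_cons {c : Char} {kw a b : List Char} (hc : c ∉ kw)
    (h : kw <+: a ++ c :: b) : kw <+: a := by
  induction a generalizing kw with
  | nil =>
      cases kw with
      | nil => exact List.nil_prefix
      | cons k kw' =>
          rw [List.nil_append, List.cons_prefix_cons] at h
          exact absurd (h.1 ▸ List.mem_cons_self) hc
  | cons x a' ih =>
      cases kw with
      | nil => exact List.nil_prefix
      | cons k kw' =>
          rw [List.cons_append, List.cons_prefix_cons] at h
          rw [List.cons_prefix_cons]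
          exact ⟨h.1, ih (fun hm => hc (List.mem_cons_of_mem _ hm)) h.2⟩

-- a keyword not containing c is an infix of 'a ++ c :: b' iff it is an infix of a or of b
theorem pv_infix_append_cons {c : Char} {kw a b : List Char} (hc : c ∉ kw) :
    kw <:+: a ++ c :: b ↔ kw <:+: a ∨ kw <:+: b := by
  constructor
  · intro h
    induction a generalizing kw with
    | nil =>
        rw [List.nil_append, List.infix_cons_iff] at h
        rcases h with h | h
        · cases kw with
          | nil => exact Or.inl (List.nil_infix)
          | cons k kw' =>
              rw [List.cons_prefix_cons] at h
              exact absurd (h.1 ▸ List.mem_cons_self) hc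
        · exact Or.inr h
    | cons x a' ih =>
        rw [List.cons_append, List.infix_cons_iff] at h
        rcases h with h | h
        · exact Or.inl (pv_prefix_append_cons hc (by simpa using h)).isInfix
        · rcases ih hc h with h' | h'
          · exact Or.inl (h'.trans (List.suffix_cons x a').isInfix)
          · exact Or.inr h'
  · rintro (h | h)
    · exact h.trans ⟨[], c :: b, by simp⟩
    · exact h.trans ⟨a ++ [c], [], by simp⟩

-- 'kw in " ".join([s1..s5])' equals the five separate membership tests, for a space-free kw
theorem pv_isIn_join5 (kw s1 s2 s3 s4 s5 : String) (h : ' ' ∉ kw.toList) :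
    PySem.Str.isIn kw (PySem.Str.join " " [s1, s2, s3, s4, s5]) =
      (PySem.Str.isIn kw s1 || PySem.Str.isIn kw s2 || PySem.Str.isIn kw s3 ||
       PySem.Str.isIn kw s4 || PySem.Str.isIn kw s5) := by
  rw [Bool.eq_iff_iff]
  simp only [Bool.or_eq_true, PySem.Str.isIn_iff_infix, PySem.Str.toList_join,
    PySem.Chars.join_cons_cons, PySem.Chars.join_singleton, List.map_cons, List.map_nil]
  simp only [show (" " : String).toList = [' '] from rfl, List.append_assoc,
    List.singleton_append]
  rw [pv_infix_append_cons h, pv_infix_append_cons h, pv_infix_append_cons h,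
    pv_infix_append_cons h]
  tauto

-- lift pv_isIn_join5 through 'any' over a list of space-free keywords
theorem pv_any_join5 (kws : List String) (h : ∀ kw ∈ kws, ' ' ∉ kw.toList)
    (s1 s2 s3 s4 s5 : String) :
    kws.any (fun kw => PySem.Str.isIn kw (PySem.Str.join " " [s1, s2, s3, s4, s5])) =
      pvHitA kws s1 s2 s3 s4 s5 := by
  unfold pvHitA
  induction kws with
  | nil => rfl
  | cons k ks ih =>
      simp only [List.any_cons]
      rw [pv_isIn_join5 k s1 s2 s3 s4 s5 (h k List.mem_cons_self),
        ih (fun kw hm => h kw (List.mem_cons_of_mem _ hm))]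

-- the inner keyword fold never increases the accumulator
theorem pv_inner_le (l : List (String × Nat)) (q : String → Bool) (b : Nat) :
    l.foldl (fun b p => if p.2 < b ∧ q p.1 = true then p.2 else b) b ≤ b := by
  induction l generalizing b with
  | nil => exact le_refl b
  | cons p l' ih =>
      simp only [List.foldl_cons]
      split_ifs with h
      · exact le_trans (ih _) (le_of_lt h.1)
      · exact ih b

-- if some keyword in the list matches, the inner fold ends ≤ its rank
theorem pv_inner_le_mem (l : List (String × Nat)) (q : String → Bool) (b : Nat)
    (p : String × Nat) (hp : p ∈ l) (hq : q p.1 = true) :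
    l.foldl (fun b p => if p.2 < b ∧ q p.1 = true then p.2 else b) b ≤ p.2 := by
  induction l generalizing b with
  | nil => cases hp
  | cons x l' ih =>
      simp only [List.foldl_cons]
      rcases List.mem_cons.mp hp with rfl | hp'
      · split_ifs with h
        · exact pv_inner_le l' q p.2
        · have : b ≤ p.2 := by
            by_contra hlt
            exact h ⟨Nat.lt_of_not_le hlt, hq⟩
          exact le_trans (pv_inner_le l' q b) this
      · split_ifs <;> exact ih _ hp'

-- the inner fold either keeps the accumulator or returns the rank of a matching keyword
theorem pv_inner_cases (l : List (String × Nat)) (q : String → Bool) (b : Nat) :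
    l.foldl (fun b p => if p.2 < b ∧ q p.1 = true then p.2 else b) b = b ∨
      ∃ p ∈ l, q p.1 = true ∧
        l.foldl (fun b p => if p.2 < b ∧ q p.1 = true then p.2 else b) b = p.2 := by
  induction l generalizing b with
  | nil => exact Or.inl rfl
  | cons x l' ih =>
      simp only [List.foldl_cons]
      by_cases hc : x.2 < b ∧ q x.1 = true
      · rw [if_pos hc]
        rcases ih x.2 with h | ⟨p, hp, hq, hv⟩
        · exact Or.inr ⟨x, List.mem_cons_self, hc.2, h⟩
        · exact Or.inr ⟨p, List.mem_cons_of_mem _ hp, hq, hv⟩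
      · rw [if_neg hc]
        rcases ih b with h | ⟨p, hp, hq, hv⟩
        · exact Or.inl h
        · exact Or.inr ⟨p, List.mem_cons_of_mem _ hp, hq, hv⟩

-- getD after Source B's setdefault/append loop = the filter of the traversed list by first char
theorem pv_getD_fold_modify (l : List (String × Nat))
    (d : PySem.Dict Char (List (String × Nat))) (c : Char) :
    PySem.Dict.getD (l.foldl (fun d p => d.modify (p.1.toList.headD ' ') [] (· ++ [p])) d) c [] =
      PySem.Dict.getD d c [] ++ l.filter (fun p => p.1.toList.headD ' ' == c) := by
  induction l generalizing d with
  | nil => simp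
  | cons p l' ih =>
      simp only [List.foldl_cons, List.filter_cons]
      rw [ih, PySem.Dict.getD_modify]
      by_cases h : p.1.toList.headD ' ' = c
      · rw [if_pos (beq_iff_eq.mpr h), if_pos h.symm, List.append_assoc, List.singleton_append, h]
      · rw [if_neg (fun hc => h hc.symm), if_neg (fun hc => h (beq_iff_eq.mp hc))]

-- the bucket of a character is the sublist of keywords starting with it
theorem pv_bucket_eq (c : Char) :
    PySem.Dict.getD pvBuckets c [] =
      pvKeywords.filter (fun p => p.1.toList.headD ' ' == c) := by
  unfold pvBuckets
  rw [pv_getD_fold_modify]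
  simp [PySem.Dict.getD_empty]

theorem pv_bucket_sub (c : Char) (q : String × Nat)
    (hq : q ∈ PySem.Dict.getD pvBuckets c []) : q ∈ pvKeywords := by
  rw [pv_bucket_eq] at hq
  exact (List.mem_filter.mp hq).1

theorem pv_mem_bucket (p : String × Nat) (hp : p ∈ pvKeywords) :
    p ∈ PySem.Dict.getD pvBuckets (p.1.toList.headD ' ') [] := by
  rw [pv_bucket_eq]
  exact List.mem_filter.mpr ⟨hp, by simp⟩

-- the generic inner-fold lemmas instantiated at Source B's inner bucket loop
theorem pvInner_le (chars : List Char) (i : Nat) (ch : Char) (b : Nat) :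
    pvInner chars i ch b ≤ b :=
  pv_inner_le _ (fun kw => kw.toList.isPrefixOf (chars.drop i)) b

theorem pvInner_le_mem (chars : List Char) (i : Nat) (ch : Char) (b : Nat) (p : String × Nat)
    (hp : p ∈ PySem.Dict.getD pvBuckets ch []) (hq : p.1.toList.isPrefixOf (chars.drop i) = true) :
    pvInner chars i ch b ≤ p.2 :=
  pv_inner_le_mem _ (fun kw => kw.toList.isPrefixOf (chars.drop i)) b p hp hq

theorem pvInner_cases (chars : List Char) (i : Nat) (ch : Char) (b : Nat) :
    pvInner chars i ch b = b ∨
      ∃ p ∈ PySem.Dict.getD pvBuckets ch [], p.1.toList.isPrefixOf (chars.drop i) = true ∧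
        pvInner chars i ch b = p.2 :=
  pv_inner_cases _ (fun kw => kw.toList.isPrefixOf (chars.drop i)) b

-- outer fold: never increases the accumulator (g i · decreasing pointwise)
theorem pv_outer_le {ι : Type} (g : ι → Nat → Nat) (hg : ∀ i b, g i b ≤ b) :
    ∀ (I : List ι) (b : Nat), I.foldl (fun b i => g i b) b ≤ b := by
  intro I
  induction I with
  | nil => intro b; exact le_refl b
  | cons i I' ih => intro b; exact le_trans (ih _) (hg i b)

-- outer fold: bounded by any bound one step guarantees
theorem pv_outer_le_of {ι : Type} (g : ι → Nat → Nat) (hg : ∀ i b, g i b ≤ b)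
    (I : List ι) (i : ι) (hi : i ∈ I) (m : Nat) (hm : ∀ b, g i b ≤ m) :
    ∀ b, I.foldl (fun b i => g i b) b ≤ m := by
  induction I with
  | nil => cases hi
  | cons j I' ih =>
      intro b
      simp only [List.foldl_cons]
      rcases List.mem_cons.mp hi with rfl | hi'
      · exact le_trans (pv_outer_le g hg I' _) (hm b)
      · exact ih hi' _

-- outer fold: either keeps the start value or the result satisfies a step-invariant Q
theorem pv_outer_cases {ι : Type} (g : ι → Nat → Nat) (Q : Nat → Prop)
    (hg : ∀ i b, g i b = b ∨ Q (g i b)) :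
    ∀ (I : List ι) (b : Nat), I.foldl (fun b i => g i b) b = b ∨ Q (I.foldl (fun b i => g i b) b) := by
  intro I
  induction I with
  | nil => intro b; exact Or.inl rfl
  | cons i I' ih =>
      intro b
      simp only [List.foldl_cons]
      rcases ih (g i b) with h | h
      · rw [h]; exact hg i b
      · exact Or.inr h

-- a nonempty keyword is an infix iff it starts at some scanned position
theorem pv_infix_iff_pos (kw l : List Char) (hk : kw ≠ []) :
    kw <:+: l ↔ ∃ i ∈ List.range l.length, kw.isPrefixOf (l.drop i) = true := by
  constructor
  · rintro ⟨s, t, h⟩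
    refine ⟨s.length, List.mem_range.mpr ?_, ?_⟩
    · have hlen : l.length = s.length + (kw.length + t.length) := by
        rw [← h]; simp [List.length_append]
      have : 0 < kw.length := List.length_pos_iff.mpr hk
      omega
    · have hdrop : l.drop s.length = kw ++ t := by
        rw [← h, List.append_assoc, List.drop_left]
      rw [hdrop, List.isPrefixOf_iff_prefix]
      exact ⟨t, rfl⟩
  · rintro ⟨i, _, hp⟩
    rw [List.isPrefixOf_iff_prefix] at hp
    exact hp.isInfix.trans (List.drop_suffix i l).isInfix

-- all keywords are nonempty (needed: an infix occurrence yields a scanned position)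
theorem pv_kw_ne_nil : ∀ p ∈ pvKeywords, p.1.toList ≠ [] := by decide

-- each keyword table entry belongs to its rank's keyword list
theorem pv_mem_rank (p : String × Nat) (hp : p ∈ pvKeywords) :
    (p.2 = 0 ∧ p.1 ∈ (["instagram", "facebook", "twitter", "linkedin", "social", "post", "platform"] : List String)) ∨
    (p.2 = 1 ∧ p.1 ∈ (["grant", "funding", "award", "prize", "scholarship", "fellowship", "financial"] : List String)) ∨
    (p.2 = 2 ∧ p.1 ∈ (["residency", "resident", "residence", "studio"] : List String)) ∨
    (p.2 = 3 ∧ p.1 ∈ (["exhibition", "exhibit", "gallery", "show", "showcase", "museum"] : List String)) ∨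
    (p.2 = 4 ∧ p.1 ∈ (["opportunity", "call", "application", "submit", "apply"] : List String)) := by
  fin_cases hp <;> decide

-- the scan computes the first (lowest-rank) matching category of A's cascade
theorem pv_scan_eq (blob : String) :
    pvScan blob.toList =
      (if (["instagram", "facebook", "twitter", "linkedin", "social", "post", "platform"] : List String).any (fun kw => PySem.Str.isIn kw blob) then 0
       else if (["grant", "funding", "award", "prize", "scholarship", "fellowship", "financial"] : List String).any (fun kw => PySem.Str.isIn kw blob) then 1
       else if (["residency", "resident", "residence", "studio"] : List String).any (fun kw => PySem.Str.isIn kw blob) then 2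
       else if (["exhibition", "exhibit", "gallery", "show", "showcase", "museum"] : List String).any (fun kw => PySem.Str.isIn kw blob) then 3
       else if (["opportunity", "call", "application", "submit", "apply"] : List String).any (fun kw => PySem.Str.isIn kw blob) then 4
       else 5) := by
  unfold pvScan
  have hg_le : ∀ (e : Int × Char) b, pvInner blob.toList e.1.toNat e.2 b ≤ b :=
    fun e b => pvInner_le _ _ _ _
  have hS2 : ∀ p ∈ pvKeywords, p.1.toList <:+: blob.toList →
      (PySem.List.enumerate blob.toList).foldl
        (fun b (e : Int × Char) => pvInner blob.toList e.1.toNat e.2 b) 5 ≤ p.2 := by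
    intro p hp hinf
    obtain ⟨k, hkmem, hpre⟩ := (pv_infix_iff_pos _ _ (pv_kw_ne_nil p hp)).mp hinf
    have hk : k < blob.toList.length := List.mem_range.mp hkmem
    obtain ⟨r, hr2⟩ := List.isPrefixOf_iff_prefix.mp hpre
    have hhead : (blob.toList.drop k).head? = some (p.1.toList.headD ' ') := by
      rw [← hr2]
      cases hx : p.1.toList with
      | nil => exact absurd hx (pv_kw_ne_nil p hp)
      | cons a as => simp
    have hgete : blob.toList[k] = p.1.toList.headD ' ' := by
      have h9 : blob.toList[k]? = some (p.1.toList.headD ' ') := by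
        rw [← Nat.add_zero k, ← List.getElem?_drop, ← List.head?_eq_getElem?]
        exact hhead
      rw [List.getElem?_eq_getElem hk] at h9
      exact Option.some.inj h9
    have hmem : ((0:Int) + (k:Int), blob.toList[k]) ∈ PySem.List.enumerate blob.toList :=
      (PySem.List.mem_enumerate_iff _ _ _).mpr ⟨k, hk, rfl⟩
    refine pv_outer_le_of _ hg_le _ _ hmem p.2 ?_ 5
    intro b
    have h0k : ((0:Int) + (k:Int)).toNat = k := by simp
    simp only [h0k, hgete]
    exact pvInner_le_mem _ _ _ _ p (pv_mem_bucket p hp) hpre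
  have hS3 := pv_outer_cases (fun (e : Int × Char) b => pvInner blob.toList e.1.toNat e.2 b)
    (fun v => ∃ p ∈ pvKeywords, p.2 = v ∧ p.1.toList <:+: blob.toList)
    (by
      intro e b
      rcases pvInner_cases blob.toList e.1.toNat e.2 b with h | ⟨p, hp, hq, hv⟩
      · exact Or.inl h
      · refine Or.inr ⟨p, pv_bucket_sub _ _ hp, hv.symm, ?_⟩
        rw [List.isPrefixOf_iff_prefix] at hq
        exact hq.isInfix.trans (List.drop_suffix e.1.toNat blob.toList).isInfix)
    (PySem.List.enumerate blob.toList) 5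
  have hS1 : (PySem.List.enumerate blob.toList).foldl
      (fun b (e : Int × Char) => pvInner blob.toList e.1.toNat e.2 b) 5 ≤ 5 :=
    pv_outer_le _ hg_le _ 5
  apply le_antisymm
  · -- scan ≤ cascade
    split_ifs with h0 h1 h2 h3 h4
    · rw [List.any_eq_true] at h0
      obtain ⟨kw, hkw, hIn⟩ := h0
      rw [PySem.Str.isIn_iff_infix] at hIn
      fin_cases hkw <;> exact hS2 ⟨_, 0⟩ (by decide) hIn
    · rw [List.any_eq_true] at h1
      obtain ⟨kw, hkw, hIn⟩ := h1
      rw [PySem.Str.isIn_iff_infix] at hIn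
      fin_cases hkw <;> exact hS2 ⟨_, 1⟩ (by decide) hIn
    · rw [List.any_eq_true] at h2
      obtain ⟨kw, hkw, hIn⟩ := h2
      rw [PySem.Str.isIn_iff_infix] at hIn
      fin_cases hkw <;> exact hS2 ⟨_, 2⟩ (by decide) hIn
    · rw [List.any_eq_true] at h3
      obtain ⟨kw, hkw, hIn⟩ := h3
      rw [PySem.Str.isIn_iff_infix] at hIn
      fin_cases hkw <;> exact hS2 ⟨_, 3⟩ (by decide) hIn
    · rw [List.any_eq_true] at h4
      obtain ⟨kw, hkw, hIn⟩ := h4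
      rw [PySem.Str.isIn_iff_infix] at hIn
      fin_cases hkw <;> exact hS2 ⟨_, 4⟩ (by decide) hIn
    · exact hS1
  · -- cascade ≤ scan
    rcases hS3 with h5 | ⟨p, hp, hr, hinf⟩
    · rw [h5]
      split_ifs <;> omega
    · rw [← hr]
      clear hr hS1 hS2 hg_le
      have hIn := (PySem.Str.isIn_iff_infix _ _).mpr hinf
      rcases pv_mem_rank p hp with ⟨he, hm⟩ | ⟨he, hm⟩ | ⟨he, hm⟩ | ⟨he, hm⟩ | ⟨he, hm⟩ <;>
        rw [he] <;>
        have ha := (List.any_eq_true (p := fun kw => PySem.Str.isIn kw blob)).mpr ⟨p.1, hm, hIn⟩ <;>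
        split_ifs <;>
        omega

-- ===== VERDICT (by name: the statement is the Claim_ definition above) =====
theorem detect_opportunity_type_spec : Claim_equal_detect_opportunity_type := by
  intro title description source tags category _
  unfold Spec_detect_opportunity_type detect_opportunity_type detect_opportunity_type_alt
  simp only [List.map_cons, List.map_nil]
  generalize pvNorm source = src
  generalize pvNorm category = cat
  generalize pvNorm tags = tg
  generalize pvNorm title = ti
  generalize pvNorm description = de
  rw [pv_scan_eq]
  rw [pv_any_join5 _ (by decide) src cat tg ti de,
      pv_any_join5 _ (by decide) src cat tg ti de,
      pv_any_join5 _ (by decide) src cat tg ti de,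
      pv_any_join5 _ (by decide) src cat tg ti de,
      pv_any_join5 _ (by decide) src cat tg ti de]
  split_ifs <;> rfl
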